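-- pv_equiv track=rewrite | github.com/SeanGT01/eflora-system | app/utils/report_service.py | _normalise_types
-- ===== SOURCE A (Python) =====
-- from typing import Iterable, List, Optional, Sequence, Tuple
--
-- REPORT_TYPES = ['orders', 'customers', 'products', 'revenue', 'riders', 'year_end']
--
-- def _normalise_types(raw: Iterable[str]) -> List[str]:
--     """Normalise + dedupe a list of report-type identifiers.
--
--     Accepts ``"all"`` (expands to everything) and silently drops unknown values.
--     """
--     out: List[str] = []
--     for t in raw or []:
--         if not t:
--             continue
--         t = str(t).strip().lower()
--         if t == 'all':
--             return list(REPORT_TYPES)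
--         if t in REPORT_TYPES and t not in out:
--             out.append(t)
--     return out or list(REPORT_TYPES)
-- ===== SOURCE B (Python) =====
-- from typing import Iterable, List
--
-- REPORT_TYPES = ['orders', 'customers', 'products', 'revenue', 'riders', 'year_end']
--
-- def _normalise_types(raw: Iterable[str]) -> List[str]:
--     """Normalise + dedupe report-type identifiers, vocabulary-first.
--
--     Instead of scanning the input and accumulating, iterate over the fixed
--     vocabulary REPORT_TYPES to pick the types that occur in the normalised
--     input (dedup is implicit), then order them by first occurrence.
--     """
--     norm = [str(t).strip().lower() for t in (raw or []) if t]
--     if 'all' in norm: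
--         return list(REPORT_TYPES)
--     present = [t for t in REPORT_TYPES if t in norm]
--     present.sort(key=norm.index)
--     return present or list(REPORT_TYPES)
-- ===== Notes on version B (the rewrite author's own statement) =====
-- stated objective: alternative
-- what changed: Replaces A's single input scan with an accumulating membership-dedup and mid-loop early return by a vocabulary-first algorithm: normalise the tokens, check 'all' by membership, select the members of the fixed REPORT_TYPES vocabulary that occur in the normalised list (dedup is implicit), and sort them by first-occurrence index (sort key norm.index).
import Mathlib
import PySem

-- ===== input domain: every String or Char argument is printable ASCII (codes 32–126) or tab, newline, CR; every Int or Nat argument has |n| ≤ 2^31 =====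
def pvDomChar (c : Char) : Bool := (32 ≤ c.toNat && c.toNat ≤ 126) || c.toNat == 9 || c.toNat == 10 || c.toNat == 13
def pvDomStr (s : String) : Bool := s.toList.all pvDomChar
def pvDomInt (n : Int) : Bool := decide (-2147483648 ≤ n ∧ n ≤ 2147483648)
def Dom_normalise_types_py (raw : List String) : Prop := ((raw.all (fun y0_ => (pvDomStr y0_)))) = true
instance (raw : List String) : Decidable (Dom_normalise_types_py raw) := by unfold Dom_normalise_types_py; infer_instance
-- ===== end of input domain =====

-- B flips the traversal: instead of A's single scan of the input with an accumulating
-- dedup, B iterates over the fixed vocabulary REPORT_TYPES and sorts the types found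
-- by first occurrence in the normalised input; objective: alternative. Return values
-- only: B sorts a fresh local list, neither mutates its argument.

def REPORT_TYPES : List String := ["orders", "customers", "products", "revenue", "riders", "year_end"]

-- ===== PORT A =====
-- literal port of A's loop: skip falsy tokens, normalise, early return on 'all',
-- append if known and not yet collected; 'out or REPORT_TYPES' at the end
def normAGo : List String → List String → List String
  | [], out => if out = [] then REPORT_TYPES else out
  | t :: rest, out =>
    if t = "" then normAGo rest out
    else
      let t' := PySem.Str.lower (PySem.Str.strip t)
      if t' = "all" then REPORT_TYPES
      else if t' ∈ REPORT_TYPES ∧ t' ∉ out then normAGo rest (out ++ [t'])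
      else normAGo rest out

def normalise_types_py (raw : List String) : List String := normAGo raw []

-- ===== PORT B =====
-- vocabulary-first: normalise; 'all' membership; pick vocabulary members present in
-- the normalised list; sort them by norm.index (present.sort(key=norm.index); the
-- .getD 0 is unreachable since every sorted element is a member of norm)
def normalise_types_py_alt (raw : List String) : List String :=
  let norm := (raw.filter (fun t => t ≠ "")).map (fun t => PySem.Str.lower (PySem.Str.strip t))
  if "all" ∈ norm then REPORT_TYPES
  else
    let present := REPORT_TYPES.filter (fun t => decide (t ∈ norm))
    let ordered := PySem.List.sorted present (fun t => (PySem.List.index? norm t).getD 0) false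
    if ordered = [] then REPORT_TYPES else ordered

-- ===== PRECONDITION & SPEC =====
def Spec_normalise_types_py (raw : List String) (out : List String) : Prop := out = normalise_types_py_alt raw
instance (raw : List String) (out : List String) : Decidable (Spec_normalise_types_py raw out) := by unfold Spec_normalise_types_py; infer_instance

-- ===== CLAIM (what is proved, stated in full; the proofs are below) =====
def Claim_equal_normalise_types_py : Prop := ∀ (raw : List String), Dom_normalise_types_py raw → Spec_normalise_types_py raw (normalise_types_py raw)

-- ===== LEMMAS AND PROOFS =====

-- the step A's loop performs on its accumulator for one normalised token
def stepA (out : List String) (t : String) : List String :=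
  if t ∈ REPORT_TYPES ∧ t ∉ out then out ++ [t] else out

-- A's loop, expressed over the normalised token list, with the early return factored out
theorem normAGo_spec (rest : List String) (out : List String) :
    normAGo rest out =
      (if "all" ∈ (rest.filter (fun t => t ≠ "")).map (fun t => PySem.Str.lower (PySem.Str.strip t))
       then REPORT_TYPES
       else
         if ((rest.filter (fun t => t ≠ "")).map (fun t => PySem.Str.lower (PySem.Str.strip t))).foldl stepA out = []
         then REPORT_TYPES
         else ((rest.filter (fun t => t ≠ "")).map (fun t => PySem.Str.lower (PySem.Str.strip t))).foldl stepA out) := by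
  induction rest generalizing out with
  | nil => simp [normAGo]
  | cons t rest ih =>
    by_cases ht : t = ""
    · subst ht
      have hf : List.filter (fun x => decide (x ≠ "")) (("" : String) :: rest) =
          List.filter (fun x => decide (x ≠ "")) rest := by simp
      simp only [normAGo]
      rw [if_pos trivial, ih, hf]
    · have hf : List.filter (fun x => decide (x ≠ "")) (t :: rest) =
          t :: List.filter (fun x => decide (x ≠ "")) rest := by
        simp [ht]
      by_cases hall : PySem.Str.lower (PySem.Str.strip t) = "all"
      · simp only [normAGo]
        rw [if_neg ht, if_pos hall, hf]
        simp [hall]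
      · simp only [normAGo]
        rw [if_neg ht, if_neg hall, hf, List.map_cons, List.foldl_cons]
        by_cases hm : "all" ∈ List.map (fun x => PySem.Str.lower (PySem.Str.strip x))
            (List.filter (fun x => decide (x ≠ "")) rest)
        · rw [if_pos (List.mem_cons_of_mem _ hm)]
          by_cases hc : PySem.Str.lower (PySem.Str.strip t) ∈ REPORT_TYPES ∧
              PySem.Str.lower (PySem.Str.strip t) ∉ out
          · rw [if_pos hc, ih, if_pos hm]
          · rw [if_neg hc, ih, if_pos hm]
        · have hm' : "all" ∉ PySem.Str.lower (PySem.Str.strip t) ::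
              List.map (fun x => PySem.Str.lower (PySem.Str.strip x))
                (List.filter (fun x => decide (x ≠ "")) rest) := by
            intro hx
            rcases List.mem_cons.mp hx with h | h
            · exact hall h.symm
            · exact hm h
          rw [if_neg hm']
          by_cases hc : PySem.Str.lower (PySem.Str.strip t) ∈ REPORT_TYPES ∧
              PySem.Str.lower (PySem.Str.strip t) ∉ out
          · rw [if_pos hc, ih, if_neg hm]
            have h2 : stepA out (PySem.Str.lower (PySem.Str.strip t)) =
                out ++ [PySem.Str.lower (PySem.Str.strip t)] := by simp [stepA, hc]
            rw [h2]
          · rw [if_neg hc, ih, if_neg hm]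
            have h2 : stepA out (PySem.Str.lower (PySem.Str.strip t)) = out := by
                simp only [stepA, if_neg hc]
            rw [h2]

-- folding stepA over a filtered accumulator = filtering the Set.add fold (dedup)
theorem foldl_stepA_eq_filter (n : List String) (s : List String) :
    n.foldl stepA (s.filter (fun t => decide (t ∈ REPORT_TYPES))) =
      (List.foldl PySem.Set.add s n).filter (fun t => decide (t ∈ REPORT_TYPES)) := by
  induction n generalizing s with
  | nil => rfl
  | cons t m ih =>
    have key : stepA (s.filter (fun t => decide (t ∈ REPORT_TYPES))) t =
        (PySem.Set.add s t).filter (fun t => decide (t ∈ REPORT_TYPES)) := by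
      by_cases hs : t ∈ s
      · simp only [stepA, PySem.Set.add, PySem.Set.contains, List.contains_eq_mem, hs,
          decide_true, if_true]
        rw [if_neg]
        rintro ⟨h1, h2⟩
        exact h2 (List.mem_filter.mpr ⟨hs, by simpa using h1⟩)
      · by_cases hr : t ∈ REPORT_TYPES
        · simp [stepA, PySem.Set.add, PySem.Set.contains, hs, hr, List.filter_append]
        · simp [stepA, PySem.Set.add, PySem.Set.contains, hs, hr, List.filter_append]
    rw [List.foldl_cons, List.foldl_cons, key, ih]

-- the first-occurrence list is strictly increasing in first index
theorem dedup_pairwise_index (n : List String) :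
    (PySem.List.dedup n).Pairwise
      (fun a b => (PySem.List.index? n a).getD 0 < (PySem.List.index? n b).getD 0) := by
  induction n using List.reverseRecOn with
  | nil => simp [PySem.List.dedup, PySem.Set.ofList]
  | append_singleton l c ih =>
    have hd : PySem.List.dedup (l ++ [c]) = PySem.Set.add (PySem.List.dedup l) c := by
      rw [PySem.List.dedup_eq_ofList, PySem.List.dedup_eq_ofList,
        PySem.Set.ofList_eq_foldl, PySem.Set.ofList_eq_foldl, List.foldl_append]
      rfl
    by_cases hc : c ∈ l
    · have hadd : PySem.Set.add (PySem.List.dedup l) c = PySem.List.dedup l := by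
        simp [PySem.Set.add, PySem.Set.contains, List.contains_eq_mem, hc]
      rw [hd, hadd]
      refine ih.imp_of_mem ?_
      intro a b ha hb hab
      rwa [PySem.List.index?_append_of_mem _ ((PySem.List.mem_dedup l a).mp ha),
        PySem.List.index?_append_of_mem _ ((PySem.List.mem_dedup l b).mp hb)]
    · have hadd : PySem.Set.add (PySem.List.dedup l) c = PySem.List.dedup l ++ [c] := by
        simp [PySem.Set.add, PySem.Set.contains, List.contains_eq_mem, hc]
      rw [hd, hadd]
      refine List.pairwise_append.mpr ⟨?_, List.pairwise_singleton _ _, ?_⟩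
      · refine ih.imp_of_mem ?_
        intro a b ha hb hab
        rwa [PySem.List.index?_append_of_mem _ ((PySem.List.mem_dedup l a).mp ha),
          PySem.List.index?_append_of_mem _ ((PySem.List.mem_dedup l b).mp hb)]
      · intro a ha b hb
        rcases List.mem_singleton.mp hb with rfl
        have hal : a ∈ l := (PySem.List.mem_dedup l a).mp ha
        have hsome : (PySem.List.index? l a).isSome :=
          (PySem.List.index?_isSome_iff l a).mpr hal
        obtain ⟨k, hk⟩ := Option.isSome_iff_exists.mp hsome
        obtain ⟨hklt, -, -⟩ := PySem.List.getElem_of_index?_eq_some hk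
        rw [PySem.List.index?_append_of_mem _ hal,
          PySem.List.index?_append_singleton_self l b hc, hk]
        simpa using hklt

-- ===== VERDICT (by name: the statement is the Claim_ definition above) =====
theorem normalise_types_py_spec : Claim_equal_normalise_types_py := by
  intro raw _
  show normalise_types_py raw = normalise_types_py_alt raw
  set n := (raw.filter (fun t => t ≠ "")).map (fun t => PySem.Str.lower (PySem.Str.strip t)) with hn
  have h0 := foldl_stepA_eq_filter n []
  simp only [List.filter_nil] at h0
  -- X := A's accumulated output = filter(∈ REPORT_TYPES) (dedup n)
  have hX : n.foldl stepA [] = (PySem.List.dedup n).filter (fun t => decide (t ∈ REPORT_TYPES)) := by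
    rw [h0]; rfl
  have hperm : ((PySem.List.dedup n).filter (fun t => decide (t ∈ REPORT_TYPES))).Perm
      (REPORT_TYPES.filter (fun t => decide (t ∈ n))) := by
    refine (List.perm_ext_iff_of_nodup
      ((PySem.List.nodup_dedup n).filter _)
      ((by decide : REPORT_TYPES.Nodup).filter _)).mpr ?_
    intro a
    simp only [List.mem_filter, PySem.List.mem_dedup, decide_eq_true_eq]
    exact ⟨fun ⟨h1, h2⟩ => ⟨h2, h1⟩, fun ⟨h1, h2⟩ => ⟨h2, h1⟩⟩
  have hpw : ((PySem.List.dedup n).filter (fun t => decide (t ∈ REPORT_TYPES))).Pairwise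
      (fun a b => (PySem.List.index? n a).getD 0 < (PySem.List.index? n b).getD 0) :=
    (dedup_pairwise_index n).filter _
  have hsorted := PySem.List.sorted_eq_of_perm_of_pairwise_lt _ _ _ hperm hpw
  rw [normalise_types_py, normAGo_spec, normalise_types_py_alt]
  simp only [← hn, hX, hsorted]
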